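-- pv_equiv track=rewrite | github.com/luisbernardinello/competitive-programming | online-judges-and-contests/codewars/1kyu-square-sums/square-sums.py | create_graph
-- ===== SOURCE A (Python) =====
-- from math import isqrt
--
-- def create_graph(n):
--     graph = {i: [] for i in range(1, n + 1)}
--     perfect_squares = set(isqrt(i) ** 2 for i in range(2 * n + 1))  # Precompute perfect squares up to 2*n
--
--     for i in range(1, n + 1):
--         for j in range(i + 1, n + 1):
--             if (i + j) in perfect_squares:
--                 graph[i].append(j)
--                 graph[j].append(i)
--
--     # Sort the adjacency lists based on the length (connectivity) of the nodes
--     for key in graph: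
--         graph[key].sort(key=lambda x: len(graph[x]), reverse=True)
--
--     return graph
-- ===== SOURCE B (Python) =====
-- from math import isqrt
--
-- def create_graph(n):
--     # For each node i, find neighbors directly by enumerating perfect squares k*k in (i, n+i]
--     adj = {}
--     for i in range(1, n + 1):
--         adj[i] = [k * k - i for k in range(isqrt(i) + 1, isqrt(n + i) + 1) if k * k != 2 * i]
--     return {i: sorted(adj[i], key=lambda x: -len(adj[x])) for i in adj}
-- ===== Notes on version B (the rewrite author's own statement) =====
-- stated objective: faster
-- what changed: Instead of testing all O(n^2) pairs (i,j) against a precomputed set of squares, B enumerates for each i the O(sqrt(n)) perfect squares k^2 in (i, n+i] and reads the neighbor j = k^2 - i directly, then sorts each adjacency list by descending neighbor degree as before.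
import Mathlib
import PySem

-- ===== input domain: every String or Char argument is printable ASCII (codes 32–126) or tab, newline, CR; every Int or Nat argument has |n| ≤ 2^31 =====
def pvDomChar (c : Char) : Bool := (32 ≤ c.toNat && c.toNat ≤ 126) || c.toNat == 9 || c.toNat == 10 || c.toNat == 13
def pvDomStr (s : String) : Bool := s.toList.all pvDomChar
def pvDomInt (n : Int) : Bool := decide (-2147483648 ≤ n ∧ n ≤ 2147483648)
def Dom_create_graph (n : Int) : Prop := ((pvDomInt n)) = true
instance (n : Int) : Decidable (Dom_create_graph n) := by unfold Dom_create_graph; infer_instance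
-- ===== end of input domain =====

-- B replaces A's O(n^2) all-pairs membership test by direct enumeration, per node i, of the
-- perfect squares k^2 in (i, n+i]; the degree sort is kept.  Objective: faster.

-- ===== PORT A =====
-- graph = {i: [] for i in range(1, n + 1)}
def pvA_graph0 (n : Int) : PySem.Dict Int (List Int) :=
  (PySem.List.pyRange 1 (n+1) 1).foldl (fun d i => d.insert i []) PySem.Dict.empty

-- perfect_squares = set(isqrt(i) ** 2 for i in range(2 * n + 1)); isqrt is exact as Nat.sqrt
-- here since every i of the range is nonnegative
def pvA_ps (n : Int) : PySem.Set Int :=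
  PySem.Set.ofList ((PySem.List.pyRange 0 (2*n+1) 1).map (fun i => ((Nat.sqrt i.toNat : Int)) ^ 2))

-- the double loop appending j to graph[i] and i to graph[j] when i+j is a perfect square
def pvA_graph1 (n : Int) : PySem.Dict Int (List Int) :=
  (PySem.List.pyRange 1 (n+1) 1).foldl (fun d i =>
    (PySem.List.pyRange (i+1) (n+1) 1).foldl (fun d j =>
      if PySem.Set.contains (pvA_ps n) (i+j) then
        (d.modify i [] (· ++ [j])).modify j [] (· ++ [i])
      else d) d) (pvA_graph0 n)

-- for key in graph: graph[key].sort(key=lambda x: len(graph[x]), reverse=True)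
def pvA_graph2 (n : Int) : PySem.Dict Int (List Int) :=
  (pvA_graph1 n).keys.foldl (fun d key =>
    d.insert key (PySem.List.sorted (d.getD key []) (fun x => ((d.getD x []).length : Int)) true))
    (pvA_graph1 n)

def create_graph (n : Int) : List (Int × List Int) :=
  (pvA_graph2 n).items

-- ===== PORT B =====
-- adj[i] = [k*k - i for k in range(isqrt(i)+1, isqrt(n+i)+1) if k*k != 2*i]
def pvB_adj (n : Int) : PySem.Dict Int (List Int) :=
  (PySem.List.pyRange 1 (n+1) 1).foldl (fun d i =>
    d.insert i (((PySem.List.pyRange ((Nat.sqrt i.toNat : Int) + 1) ((Nat.sqrt (n+i).toNat : Int) + 1) 1).filter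
      (fun k => k*k ≠ 2*i)).map (fun k => k*k - i))) PySem.Dict.empty

-- {i: sorted(adj[i], key=lambda x: -len(adj[x])) for i in adj}
def create_graph_alt (n : Int) : List (Int × List Int) :=
  (pvB_adj n).keys.map (fun i =>
    (i, PySem.List.sorted ((pvB_adj n).getD i []) (fun x => -(((pvB_adj n).getD x []).length : Int)) false))

-- ===== PRECONDITION & SPEC =====
def Spec_create_graph (n : Int) (out : List (Int × List Int)) : Prop := out = create_graph_alt n
instance (n : Int) (out : List (Int × List Int)) : Decidable (Spec_create_graph n out) := by unfold Spec_create_graph; infer_instance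

-- ===== CLAIM (what is proved, stated in full; the proofs are below) =====
def Claim_equal_create_graph : Prop := ∀ (n : Int), Dom_create_graph n → Spec_create_graph n (create_graph n)

-- ===== LEMMAS AND PROOFS =====

-- the square test, and the (increasing) adjacency list of v among 1..n
def pvSq (m : Int) : Bool := decide (((Nat.sqrt m.toNat : Int)) ^ 2 = m)

def pvNb (n v : Int) : List Int :=
  (PySem.List.pyRange 1 (n+1) 1).filter (fun u => decide (u ≠ v) && pvSq (v+u))

-- A's adjacency predicate (via the precomputed set), full and prefix versions
def pvNbA (n v : Int) : List Int :=
  (PySem.List.pyRange 1 (n+1) 1).filter (fun u => decide (u ≠ v) && PySem.Set.contains (pvA_ps n) (v+u))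

def pvTrA (n m v : Int) : List Int :=
  (PySem.List.pyRange 1 m 1).filter (fun u => decide (u ≠ v) && PySem.Set.contains (pvA_ps n) (v+u))

lemma pv_graph0_items (n : Int) :
    (pvA_graph0 n).items = (PySem.List.pyRange 1 (n+1) 1).map (fun i => (i, ([] : List Int))) := by
  unfold pvA_graph0
  rw [PySem.Dict.items_foldl_insert_fresh (PySem.List.pyRange 1 (n+1) 1) (fun a => a)
    (fun _ => ([] : List Int)) PySem.Dict.empty (by intro a _; simp [PySem.Dict.contains_empty])
    (by simpa using PySem.List.nodup_pyRange_one 1 (n+1))]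
  rfl

lemma pv_graph0_keys (n : Int) : (pvA_graph0 n).keys = PySem.List.pyRange 1 (n+1) 1 := by
  simp only [PySem.Dict.keys, pv_graph0_items n, List.map_map]
  simp [Function.comp_def]

lemma pv_graph0_getD (n v : Int) : (pvA_graph0 n).getD v [] = [] := by
  by_cases hc : (pvA_graph0 n).contains v = true
  · rw [PySem.Dict.contains_iff_mem_keys, pv_graph0_keys] at hc
    have : (v, ([] : List Int)) ∈ (pvA_graph0 n).items := by
      rw [pv_graph0_items]; exact List.mem_map.mpr ⟨v, hc, rfl⟩
    exact PySem.Dict.getD_of_mem_items _ this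
      (by rw [pv_graph0_keys]; exact PySem.List.nodup_pyRange_one 1 (n+1)) []
  · exact PySem.Dict.getD_of_not_contains _ _ (by simpa using hc)

lemma pv_mem_ps (n x : Int) (h0 : 0 ≤ x) (h1 : x < 2*n+1) :
    x ∈ pvA_ps n ↔ ((Nat.sqrt x.toNat : Int)) ^ 2 = x := by
  unfold pvA_ps
  rw [PySem.Set.mem_ofList, List.mem_map]
  constructor
  · rintro ⟨t, _, rfl⟩
    set K := Nat.sqrt t.toNat with hK
    rw [show ((K : Int))^2 = ((K^2 : Nat) : Int) by push_cast; ring, Int.toNat_natCast,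
      Nat.sqrt_eq']
    push_cast
    ring
  · intro h
    exact ⟨x, PySem.List.mem_pyRange_one.mpr ⟨h0, h1⟩, h⟩

lemma pv_nbA_eq_nb (n v : Int) (hv1 : 1 ≤ v) (hv2 : v ≤ n) : pvNbA n v = pvNb n v := by
  unfold pvNbA pvNb
  apply List.filter_congr
  intro u hu
  obtain ⟨hu1, hu2⟩ := PySem.List.mem_pyRange_one.mp hu
  congr 1
  unfold pvSq
  rw [Bool.eq_iff_iff, PySem.Set.contains_iff, decide_eq_true_eq]
  exact pv_mem_ps n (v+u) (by omega) (by omega)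

lemma pv_keys_modify_mem {d : PySem.Dict Int (List Int)} {k : Int} (f : List Int → List Int)
    (hk : k ∈ d.keys) : (d.modify k [] f).keys = d.keys := by
  rw [PySem.Dict.keys_modify]
  exact PySem.Dict.keys_insert_of_contains _ _ ((PySem.Dict.contains_iff_mem_keys d k).mpr hk)

-- the inner loop of A over an arbitrary duplicate-free candidate list L with i ∉ L
lemma pv_inner (i : Int) (P : Int → Bool) (L : List Int) (d : PySem.Dict Int (List Int))
    (hnd : L.Nodup) (hiL : i ∉ L) (hik : i ∈ d.keys) (hLk : ∀ j ∈ L, j ∈ d.keys) :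
    (L.foldl (fun d j =>
      if P j then (d.modify i [] (· ++ [j])).modify j [] (· ++ [i]) else d) d).keys = d.keys ∧
    (L.foldl (fun d j =>
      if P j then (d.modify i [] (· ++ [j])).modify j [] (· ++ [i]) else d) d).getD i []
      = d.getD i [] ++ L.filter P ∧
    ∀ v, v ≠ i → (L.foldl (fun d j =>
      if P j then (d.modify i [] (· ++ [j])).modify j [] (· ++ [i]) else d) d).getD v []
      = d.getD v [] ++ (if v ∈ L ∧ P v = true then [i] else []) := by
  induction L generalizing d with
  | nil => simp
  | cons j L ih =>
      have hji : j ≠ i := fun h => hiL (h ▸ List.mem_cons_self ..)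
      have hjL : j ∉ L := (List.nodup_cons.mp hnd).1
      simp only [List.foldl_cons]
      by_cases hP : P j = true
      · have hjk : j ∈ d.keys := hLk j (by simp)
        set d' := (d.modify i [] (· ++ [j])).modify j [] (· ++ [i]) with hd'
        have hkeys' : d'.keys = d.keys := by
          rw [hd', pv_keys_modify_mem _ (by rw [pv_keys_modify_mem _ hik]; exact hjk),
            pv_keys_modify_mem _ hik]
        have hgi : d'.getD i [] = d.getD i [] ++ [j] := by
          rw [hd', PySem.Dict.getD_modify, if_neg (Ne.symm hji), PySem.Dict.getD_modify,
            if_pos rfl]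
        have hgj : d'.getD j [] = d.getD j [] ++ [i] := by
          rw [hd', PySem.Dict.getD_modify, if_pos rfl, PySem.Dict.getD_modify, if_neg hji]
        have hgv : ∀ v, v ≠ i → v ≠ j → d'.getD v [] = d.getD v [] := by
          intro v hvi hvj
          rw [hd', PySem.Dict.getD_modify, if_neg hvj, PySem.Dict.getD_modify, if_neg hvi]
        obtain ⟨ik, ii, iv⟩ := ih d' (List.nodup_cons.mp hnd).2
          (fun h => hiL (List.mem_cons_of_mem _ h))
          (by rw [hkeys']; exact hik) (fun x hx => by rw [hkeys']; exact hLk x (by simp [hx]))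
        rw [if_pos hP]
        refine ⟨by rw [ik, hkeys'], ?_, ?_⟩
        · rw [ii, hgi, List.filter_cons_of_pos hP]
          simp
        · intro v hvi
          by_cases hvj : v = j
          · subst hvj
            rw [iv v hvi, hgj, if_neg (by rintro ⟨h, _⟩; exact hjL h),
              if_pos ⟨by simp, hP⟩]
            simp
          · rw [iv v hvi, hgv v hvi hvj]
            congr 1
            by_cases hm : v ∈ L <;> simp [hm, hvj]
      · rw [if_neg hP]
        obtain ⟨ik, ii, iv⟩ := ih d (List.nodup_cons.mp hnd).2
          (fun h => hiL (List.mem_cons_of_mem _ h)) hik (fun x hx => hLk x (by simp [hx]))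
        refine ⟨ik, ?_, ?_⟩
        · rw [ii, List.filter_cons_of_neg (by simpa using hP)]
        · intro v hvi
          rw [iv v hvi]
          congr 1
          by_cases hvj : v = j
          · subst hvj; simp [hP]
          · by_cases hm : v ∈ L <;> simp [hm, hvj]

-- the outer double loop: processed nodes carry their full list, unprocessed ones a prefix
lemma pv_outer (n : Int) : ∀ m, 1 ≤ m → m ≤ n+1 →
    ((PySem.List.pyRange 1 m 1).foldl (fun d i =>
      (PySem.List.pyRange (i+1) (n+1) 1).foldl (fun d j =>
        if PySem.Set.contains (pvA_ps n) (i+j) then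
          (d.modify i [] (· ++ [j])).modify j [] (· ++ [i])
        else d) d) (pvA_graph0 n)).keys = PySem.List.pyRange 1 (n+1) 1 ∧
    ∀ v, 1 ≤ v → v ≤ n →
      ((PySem.List.pyRange 1 m 1).foldl (fun d i =>
        (PySem.List.pyRange (i+1) (n+1) 1).foldl (fun d j =>
          if PySem.Set.contains (pvA_ps n) (i+j) then
            (d.modify i [] (· ++ [j])).modify j [] (· ++ [i])
          else d) d) (pvA_graph0 n)).getD v []
        = if v < m then pvNbA n v else pvTrA n m v := by
  intro m hm
  induction m, hm using Int.le_induction with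
  | base =>
      intro _
      rw [PySem.List.pyRange_one_eq_nil le_rfl]
      simp only [List.foldl_nil]
      refine ⟨pv_graph0_keys n, ?_⟩
      intro v hv1 hv2
      rw [pv_graph0_getD, if_neg (by omega)]
      unfold pvTrA
      rw [PySem.List.pyRange_one_eq_nil le_rfl]
      rfl
  | succ m hm ih =>
      intro hmn1
      have hmn : m ≤ n := by omega
      obtain ⟨ihk, ihg⟩ := ih (by omega)
      rw [PySem.List.pyRange_one_succ_right hm, List.foldl_append, List.foldl_cons,
        List.foldl_nil]
      obtain ⟨ik, ii, iv⟩ := pv_inner m (fun j => PySem.Set.contains (pvA_ps n) (m+j))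
        (PySem.List.pyRange (m+1) (n+1) 1) _ (PySem.List.nodup_pyRange_one _ _)
        (fun h => by have := PySem.List.mem_pyRange_one.mp h; omega)
        (by rw [ihk]; exact PySem.List.mem_pyRange_one.mpr ⟨by omega, by omega⟩)
        (by intro j hj; rw [ihk]
            have := PySem.List.mem_pyRange_one.mp hj
            exact PySem.List.mem_pyRange_one.mpr ⟨by omega, this.2⟩)
      refine ⟨by rw [ik, ihk], ?_⟩
      intro v hv1 hv2
      by_cases hvm : v = m
      · subst hvm
        rw [ii, ihg v hv1 hv2, if_neg (by omega), if_pos (by omega)]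
        unfold pvNbA pvTrA
        rw [PySem.List.pyRange_one_append 1 v (n+1) (by omega) (by omega), List.filter_append,
          PySem.List.pyRange_one_cons (show v < n+1 by omega), List.filter_cons_of_neg (by simp)]
        congr 1
        apply List.filter_congr
        intro j hj
        have := PySem.List.mem_pyRange_one.mp hj
        simp [show j ≠ v by omega, Int.add_comm v j]
      · rw [iv v hvm]
        by_cases hlt : v < m
        · rw [ihg v hv1 hv2, if_pos hlt,
            if_neg (show ¬(v ∈ PySem.List.pyRange (m+1) (n+1) 1 ∧
                PySem.Set.contains (pvA_ps n) (m+v) = true) by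
              rintro ⟨h, _⟩; have := PySem.List.mem_pyRange_one.mp h; omega),
            if_pos (show v < m+1 by omega)]
          simp
        · rw [ihg v hv1 hv2, if_neg hlt, if_neg (show ¬ v < m+1 by omega)]
          unfold pvTrA
          rw [PySem.List.pyRange_one_succ_right (show (1:Int) ≤ m by omega), List.filter_append]
          congr 1
          have hmv : (decide (m ≠ v) && PySem.Set.contains (pvA_ps n) (v+m))
              = PySem.Set.contains (pvA_ps n) (m+v) := by
            simp [show m ≠ v from fun h => hvm h.symm, Int.add_comm v m]
          by_cases hc : PySem.Set.contains (pvA_ps n) (m+v) = true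
          · rw [if_pos (show v ∈ PySem.List.pyRange (m+1) (n+1) 1 ∧
                PySem.Set.contains (pvA_ps n) (m+v) = true from
                ⟨PySem.List.mem_pyRange_one.mpr ⟨by omega, by omega⟩, hc⟩)]
            simp only [List.filter_cons, List.filter_nil, hmv, hc]
            rfl
          · rw [if_neg (by rintro ⟨_, h⟩; exact hc h)]
            simp only [List.filter_cons, List.filter_nil, hmv]
            rw [if_neg hc]

lemma pv_graph1_keys (n : Int) (hn : 0 ≤ n) :
    (pvA_graph1 n).keys = PySem.List.pyRange 1 (n+1) 1 := by
  exact (pv_outer n (n+1) (by omega) le_rfl).1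

lemma pv_graph1_getD (n v : Int) (hn : 0 ≤ n) (hv1 : 1 ≤ v) (hv2 : v ≤ n) :
    (pvA_graph1 n).getD v [] = pvNb n v := by
  have h := (pv_outer n (n+1) (by omega) le_rfl).2 v hv1 hv2
  rw [if_pos (by omega)] at h
  unfold pvA_graph1
  rw [h, pv_nbA_eq_nb n v hv1 hv2]

-- congruence of the stable sort in the key function
lemma pv_insertBy_congr {α : Type} (b1 b2 : α → α → Bool) (x : α) (ys : List α)
    (h : ∀ y ∈ ys, b1 x y = b2 x y) :
    PySem.List.insertBy b1 x ys = PySem.List.insertBy b2 x ys := by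
  induction ys with
  | nil => rfl
  | cons y ys ih =>
      simp only [PySem.List.insertBy]
      rw [h y (by simp)]
      by_cases hc : b2 x y = true
      · simp [hc]
      · simp only [Bool.not_eq_true] at hc
        simp [hc, ih (fun z hz => h z (by simp [hz]))]

lemma pv_foldl_insertBy_congr {α : Type} (b1 b2 : α → α → Bool) (xs : List α)
    (h : ∀ a ∈ xs, ∀ y ∈ xs, b1 a y = b2 a y) : ∀ (acc : List α),
    (∀ a ∈ xs, ∀ y ∈ acc, b1 a y = b2 a y) →
    xs.foldl (fun acc x => PySem.List.insertBy b1 x acc) acc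
      = xs.foldl (fun acc x => PySem.List.insertBy b2 x acc) acc := by
  induction xs with
  | nil => intro acc _; rfl
  | cons x xs ih =>
      intro acc hacc
      simp only [List.foldl_cons]
      rw [pv_insertBy_congr b1 b2 x acc (fun y hy => hacc x (by simp) y hy)]
      apply ih
      · intro a ha y hy; exact h a (by simp [ha]) y (by simp [hy])
      · intro a ha y hy
        rcases (PySem.List.mem_insertBy b2 x y acc).mp hy with rfl | hy'
        · exact h a (by simp [ha]) y (by simp)
        · exact hacc a (by simp [ha]) y hy'

lemma pv_sorted_congr {α : Type} (xs : List α) (k1 k2 : α → Int) (rev : Bool)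
    (h : ∀ a ∈ xs, k1 a = k2 a) :
    PySem.List.sorted xs k1 rev = PySem.List.sorted xs k2 rev := by
  cases rev
  · rw [PySem.List.sorted_eq_foldl_insertBy, PySem.List.sorted_eq_foldl_insertBy]
    exact pv_foldl_insertBy_congr _ _ xs
      (fun a ha y hy => by rw [h a ha, h y hy]) [] (by simp)
  · rw [PySem.List.sorted_rev_eq_foldl_insertBy, PySem.List.sorted_rev_eq_foldl_insertBy]
    exact pv_foldl_insertBy_congr _ _ xs
      (fun a ha y hy => by rw [h a ha, h y hy]) [] (by simp)

lemma pv_sorted_neg_key {α : Type} (xs : List α) (k : α → Int) :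
    PySem.List.sorted xs k true = PySem.List.sorted xs (fun x => -(k x)) false := by
  rw [PySem.List.sorted_rev_eq_foldl_insertBy, PySem.List.sorted_eq_foldl_insertBy]
  have : (fun (a b : α) => decide (k b < k a)) = (fun a b => decide (-(k a) < -(k b))) := by
    funext a b; rw [decide_eq_decide]; omega
  rw [this]

lemma pv_mem_nb (n v u : Int) (h : u ∈ pvNb n v) : 1 ≤ u ∧ u < n + 1 := by
  unfold pvNb at h
  rw [List.mem_filter] at h
  exact PySem.List.mem_pyRange_one.mp h.1

-- the final sorting loop of A, over the key prefix 1..m-1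
lemma pv_sortloop (n : Int) (hn : 0 ≤ n) : ∀ m, 1 ≤ m → m ≤ n+1 →
    ((PySem.List.pyRange 1 m 1).foldl (fun d key =>
      d.insert key (PySem.List.sorted (d.getD key []) (fun x => ((d.getD x []).length : Int)) true))
      (pvA_graph1 n)).keys = PySem.List.pyRange 1 (n+1) 1 ∧
    ∀ v, 1 ≤ v → v ≤ n →
      ((PySem.List.pyRange 1 m 1).foldl (fun d key =>
        d.insert key (PySem.List.sorted (d.getD key []) (fun x => ((d.getD x []).length : Int)) true))
        (pvA_graph1 n)).getD v [] = if v < m then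
          PySem.List.sorted (pvNb n v) (fun x => ((pvNb n x).length : Int)) true
        else pvNb n v := by
  intro m hm
  induction m, hm using Int.le_induction with
  | base =>
      intro _
      rw [PySem.List.pyRange_one_eq_nil le_rfl]
      simp only [List.foldl_nil]
      exact ⟨pv_graph1_keys n hn, fun v h1 h2 => by
        rw [pv_graph1_getD n v hn h1 h2, if_neg (by omega)]⟩
  | succ m hm ih =>
      intro hmn1
      obtain ⟨ihk, ihg⟩ := ih (by omega)
      rw [PySem.List.pyRange_one_succ_right hm, List.foldl_append, List.foldl_cons,
        List.foldl_nil]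
      have hkeys := PySem.Dict.keys_insert_of_contains _
        (PySem.List.sorted (((PySem.List.pyRange 1 m 1).foldl (fun d key =>
          d.insert key (PySem.List.sorted (d.getD key []) (fun x => ((d.getD x []).length : Int)) true))
          (pvA_graph1 n)).getD m [])
          (fun x => ((((PySem.List.pyRange 1 m 1).foldl (fun d key =>
            d.insert key (PySem.List.sorted (d.getD key []) (fun x => ((d.getD x []).length : Int)) true))
            (pvA_graph1 n)).getD x []).length : Int)) true)
        ((PySem.Dict.contains_iff_mem_keys _ m).mpr
          (by rw [ihk]; exact PySem.List.mem_pyRange_one.mpr ⟨by omega, by omega⟩))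
      refine ⟨by rw [hkeys, ihk], ?_⟩
      intro v hv1 hv2
      rw [PySem.Dict.getD_insert]
      by_cases hvm : v = m
      · subst hvm
        rw [if_pos rfl, ihg v hv1 hv2, if_neg (show ¬ v < v by omega),
          if_pos (show v < v + 1 by omega)]
        apply pv_sorted_congr
        intro x hx
        obtain ⟨hx1, hx2⟩ := pv_mem_nb n v x hx
        rw [ihg x hx1 (by omega)]
        by_cases hxlt : x < v
        · rw [if_pos hxlt, PySem.List.length_sorted]
        · rw [if_neg hxlt]
      · rw [if_neg hvm, ihg v hv1 hv2]
        by_cases hlt : v < m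
        · rw [if_pos hlt, if_pos (show v < m + 1 by omega)]
        · rw [if_neg hlt, if_neg (show ¬ v < m + 1 by omega)]

-- A's result in closed form
lemma pv_A_closed (n : Int) :
    create_graph n = (PySem.List.pyRange 1 (n+1) 1).map (fun v =>
      (v, PySem.List.sorted (pvNb n v) (fun x => (((pvNb n x).length : Int))) true)) := by
  by_cases hn : 0 ≤ n
  · unfold create_graph pvA_graph2
    rw [pv_graph1_keys n hn]
    obtain ⟨hk, hg⟩ := pv_sortloop n hn (n+1) (by omega) le_rfl
    rw [PySem.Dict.items_eq_map_keys _
      (by rw [hk]; exact PySem.List.nodup_pyRange_one _ _) [], hk]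
    apply List.map_congr_left
    intro v hv
    obtain ⟨hv1, hv2⟩ := PySem.List.mem_pyRange_one.mp hv
    rw [hg v hv1 (by omega), if_pos (by omega)]
  · have h0 : PySem.List.pyRange 1 (n+1) 1 = [] := PySem.List.pyRange_one_eq_nil (by omega)
    unfold create_graph pvA_graph2 pvA_graph1 pvA_graph0
    rw [h0]
    simp [PySem.Dict.empty, PySem.Dict.keys]

-- B's per-node comprehension, as a named list
def pvBL (n i : Int) : List Int :=
  ((PySem.List.pyRange ((Nat.sqrt i.toNat : Int) + 1) ((Nat.sqrt (n+i).toNat : Int) + 1) 1).filter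
    (fun k => k*k ≠ 2*i)).map (fun k => k*k - i)

-- B's per-node comprehension equals the filtered range
lemma pv_BL_eq_nb (n i : Int) (hi1 : 1 ≤ i) (hi2 : i ≤ n) : pvBL n i = pvNb n i := by
  have hpwL : (pvBL n i).Pairwise (· < ·) := by
    unfold pvBL
    rw [List.pairwise_map]
    refine List.Pairwise.imp_of_mem ?_
      ((PySem.List.pairwise_lt_pyRange_one _ _).filter _)
    intro a b ha hb hab
    have ha' := (PySem.List.mem_pyRange_one.mp (List.mem_of_mem_filter ha)).1
    have ha1 : 1 ≤ a := by
      have := Int.natCast_nonneg (Nat.sqrt i.toNat); omega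
    nlinarith
  have hpwR : (pvNb n i).Pairwise (· < ·) :=
    (PySem.List.pairwise_lt_pyRange_one _ _).filter _
  have hmem : ∀ u : Int, u ∈ pvBL n i ↔ u ∈ pvNb n i := by
    intro u
    unfold pvBL pvNb pvSq
    simp only [List.mem_map, List.mem_filter, PySem.List.mem_pyRange_one,
      Bool.and_eq_true, decide_eq_true_eq]
    constructor
    · rintro ⟨k, ⟨⟨hk1, hk2⟩, hk3⟩, rfl⟩
      have hs0 : (0:Int) ≤ (Nat.sqrt i.toNat : Int) := Int.natCast_nonneg _
      have hk0 : 0 < k := by omega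
      have hkK : ((k.toNat : Int)) = k := Int.toNat_of_nonneg (by omega)
      have hlt : Nat.sqrt i.toNat < k.toNat := by omega
      have h2 : i.toNat < k.toNat ^ 2 := Nat.sqrt_lt'.mp hlt
      have h2' : (i : Int) < k * k := by
        have := (Nat.cast_lt (α := Int)).mpr h2
        push_cast at this
        rw [hkK] at this
        rw [Int.toNat_of_nonneg (by omega)] at this
        nlinarith
      have hle : k.toNat ≤ Nat.sqrt (n+i).toNat := by omega
      have h3 : k.toNat * k.toNat ≤ (n+i).toNat := Nat.le_sqrt.mp hle
      have h3' : k * k ≤ n + i := by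
        have := (Nat.cast_le (α := Int)).mpr h3
        push_cast at this
        rw [hkK] at this
        rw [Int.toNat_of_nonneg (by omega)] at this
        exact this
      have hKK : (k*k).toNat = k.toNat * k.toNat := by
        have : ((k.toNat * k.toNat : Nat) : Int) = k * k := by push_cast; rw [hkK]
        omega
      refine ⟨⟨by omega, by omega⟩, by omega, ?_⟩
      rw [show i + (k * k - i) = k * k by ring, hKK, show k.toNat * k.toNat = k.toNat ^ 2 by ring,
        Nat.sqrt_eq']
      rw [hkK]
      ring
    · rintro ⟨⟨hu1, hu2⟩, hui, hsq⟩
      set K := Nat.sqrt (i+u).toNat with hKdef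
      have hsq' : ((K:Int)) * K = i + u := by
        rw [← pow_two]; exact hsq
      refine ⟨(K : Int), ⟨⟨?_, ?_⟩, by omega⟩, by omega⟩
      · -- Nat.sqrt i.toNat < K
        have hKK : ((K * K : Nat) : Int) = i + u := by push_cast; exact hsq'
        have h1 : i.toNat < K * K := by omega
        have : Nat.sqrt i.toNat < K := Nat.sqrt_lt'.mpr (by
          rw [show K ^ 2 = K * K by ring]; exact h1)
        omega
      · have hKK : ((K * K : Nat) : Int) = i + u := by push_cast; exact hsq'
        have h1 : K * K ≤ (n+i).toNat := by omega
        have : K ≤ Nat.sqrt (n+i).toNat := Nat.le_sqrt.mpr h1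
        omega
  have nd1 : (pvBL n i).Nodup := hpwL.imp (fun h => ne_of_lt h)
  have nd2 : (pvNb n i).Nodup := hpwR.imp (fun h => ne_of_lt h)
  exact List.Perm.eq_of_pairwise (fun a b _ _ h1 h2 => (lt_asymm h1 h2).elim) hpwL hpwR
    ((List.perm_ext_iff_of_nodup nd1 nd2).mpr hmem)

lemma pv_B_items (n : Int) :
    (pvB_adj n).items = (PySem.List.pyRange 1 (n+1) 1).map (fun i => (i, pvBL n i)) := by
  unfold pvB_adj
  rw [PySem.Dict.items_foldl_insert_fresh (PySem.List.pyRange 1 (n+1) 1) (fun a => a)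
    (fun i => ((PySem.List.pyRange ((Nat.sqrt i.toNat : Int) + 1) ((Nat.sqrt (n+i).toNat : Int) + 1) 1).filter
      (fun k => k*k ≠ 2*i)).map (fun k => k*k - i)) PySem.Dict.empty
    (by intro a _; simp [PySem.Dict.contains_empty])
    (by simpa using PySem.List.nodup_pyRange_one 1 (n+1))]
  rfl

lemma pv_B_keys (n : Int) : (pvB_adj n).keys = PySem.List.pyRange 1 (n+1) 1 := by
  simp only [PySem.Dict.keys, pv_B_items n, List.map_map]
  simp [Function.comp_def]

lemma pv_B_getD (n i : Int) (hi : i ∈ PySem.List.pyRange 1 (n+1) 1) :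
    (pvB_adj n).getD i [] = pvBL n i := by
  have : (i, pvBL n i) ∈ (pvB_adj n).items := by
    rw [pv_B_items]; exact List.mem_map.mpr ⟨i, hi, rfl⟩
  exact PySem.Dict.getD_of_mem_items _ this
    (by rw [pv_B_keys]; exact PySem.List.nodup_pyRange_one 1 (n+1)) []

lemma pv_B_closed (n : Int) :
    create_graph_alt n = (PySem.List.pyRange 1 (n+1) 1).map (fun v =>
      (v, PySem.List.sorted (pvNb n v) (fun x => -(((pvNb n x).length : Int))) false)) := by
  unfold create_graph_alt
  rw [pv_B_keys]
  apply List.map_congr_left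
  intro i hi
  obtain ⟨hi1, hi2⟩ := PySem.List.mem_pyRange_one.mp hi
  rw [pv_B_getD n i hi, pv_BL_eq_nb n i hi1 (by omega)]
  refine congrArg (fun l => (i, l)) ?_
  apply pv_sorted_congr
  intro x hx
  obtain ⟨hx1, hx2⟩ := pv_mem_nb n i x hx
  rw [pv_B_getD n x (PySem.List.mem_pyRange_one.mpr ⟨hx1, hx2⟩), pv_BL_eq_nb n x hx1 (by omega)]

-- ===== VERDICT (by name: the statement is the Claim_ definition above) =====
theorem create_graph_spec : Claim_equal_create_graph := by
  intro n _
  unfold Spec_create_graph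
  rw [pv_A_closed, pv_B_closed]
  apply List.map_congr_left
  intro v _
  exact congrArg _ (pv_sorted_neg_key _ _)
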